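-- pv_equiv track=rewrite | github.com/jbn9062/AoC-2022 | aoc/day12.py | elevation
-- ===== SOURCE A (Python) =====
-- import string
--
-- alphabets = dict(zip(string.ascii_lowercase, range(1, 27)))
--
-- def elevation(ch):
--     height = 0
--     for i in alphabets.keys():
--         if i == ch:
--             height = alphabets[ch]
--         if ch == 'S':
--             height = alphabets['a']
--         if ch == 'E':
--             height = alphabets['z']
--     return height
-- ===== SOURCE B (Python) =====
-- def elevation(ch):
--     if ch == 'S':
--         return 1
--     if ch == 'E':
--         return 26
--     if isinstance(ch, str) and len(ch) == 1 and 'a' <= ch <= 'z':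
--         return ord(ch) - ord('a') + 1
--     return 0
-- ===== Notes on version B (the rewrite author's own statement) =====
-- stated objective: simpler
-- what changed: Replaced the precomputed letter->height dict and the 26-iteration scan with early returns for 'S'/'E' and closed-form arithmetic ord(ch)-ord('a')+1 on a guarded single lowercase character.
import Mathlib
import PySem

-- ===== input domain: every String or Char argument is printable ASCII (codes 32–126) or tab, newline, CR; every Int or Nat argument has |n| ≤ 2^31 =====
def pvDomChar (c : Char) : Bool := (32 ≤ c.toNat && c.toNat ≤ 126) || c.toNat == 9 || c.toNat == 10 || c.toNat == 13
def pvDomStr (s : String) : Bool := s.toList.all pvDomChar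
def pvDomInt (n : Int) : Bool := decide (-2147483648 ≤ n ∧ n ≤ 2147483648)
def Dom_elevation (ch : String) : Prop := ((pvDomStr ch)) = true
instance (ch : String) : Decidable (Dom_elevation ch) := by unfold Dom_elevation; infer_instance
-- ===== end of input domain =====

-- B replaces A's dict + 26-step scan with early returns and closed-form character arithmetic (simpler).

-- ===== PORT A =====
-- alphabets = dict(zip(string.ascii_lowercase, range(1, 27)))
def pvAlphabets : PySem.Dict String Int :=
  PySem.Dict.ofList (List.zip ["a", "b", "c", "d", "e", "f", "g", "h", "i", "j", "k", "l", "m", "n", "o", "p", "q", "r", "s", "t", "u", "v", "w", "x", "y", "z"] (PySem.List.pyRange 1 27 1))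

def elevation (ch : String) : Int :=
  pvAlphabets.keys.foldl (fun height i =>
    -- alphabets[ch] can only be reached when i == ch, so the key is present; getD 0 is exact here
    let height := if i = ch then pvAlphabets.getD ch 0 else height
    let height := if ch = "S" then pvAlphabets.getD "a" 0 else height
    if ch = "E" then pvAlphabets.getD "z" 0 else height) 0

-- ===== PORT B =====
def elevation_alt (ch : String) : Int :=
  if ch = "S" then 1
  else if ch = "E" then 26
  else match ch.toList with
    | [c] => if 'a' ≤ c ∧ c ≤ 'z' then ((c.toNat : Int) - 97) + 1 else 0
    | _ => 0

-- ===== PRECONDITION & SPEC =====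
def Spec_elevation (ch : String) (out : Int) : Prop := out = elevation_alt ch
instance (ch : String) (out : Int) : Decidable (Spec_elevation ch out) := by unfold Spec_elevation; infer_instance

-- ===== CLAIM (what is proved, stated in full; the proofs are below) =====
def Claim_equal_elevation : Prop := ∀ (ch : String), Dom_elevation ch → Spec_elevation ch (elevation ch)


-- ===== LEMMAS AND PROOFS =====
theorem char_eq_iff_toNat (d e : Char) : (d = e) ↔ (d.toNat = e.toNat) :=
  ⟨fun h => congrArg Char.toNat h, fun h => Char.ext (UInt32.toNat_inj.mp h)⟩

theorem char_le_toNat (d e : Char) : (d ≤ e) ↔ d.toNat ≤ e.toNat := by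
  rw [Char.le_def]; exact UInt32.le_iff_toNat_le

theorem elevation_eq_alt (ch : String) : elevation ch = elevation_alt ch := by
  by_cases hE : ch = "E"
  · subst hE; decide
  by_cases hS : ch = "S"
  · subst hS; decide
  have hk : pvAlphabets.keys = ["a", "b", "c", "d", "e", "f", "g", "h", "i", "j", "k", "l", "m", "n", "o", "p", "q", "r", "s", "t", "u", "v", "w", "x", "y", "z"] := by decide
  unfold elevation elevation_alt
  rw [hk]
  simp only [List.foldl, hS, hE, if_false]
  rcases h : ch.toList with _ | ⟨c, _ | ⟨d, t⟩⟩
  · simp only [← String.toList_inj, h]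
    simp
  · have hch : ch = String.ofList [c] := String.toList_inj.mp (by rw [h, String.toList_ofList])
    subst hch
    simp only [String.toList_ofList] at h
    simp only [← String.toList_inj, String.toList_ofList]
    by_cases hc : 97 ≤ c.toNat ∧ c.toNat ≤ 122
    · obtain ⟨h1, h2⟩ := hc
      interval_cases hn : c.toNat <;>
        · have hcc : Char.ofNat c.toNat = c := Char.ofNat_toNat c
          rw [hn] at hcc
          subst hcc
          decide
    · have hne : ∀ k : Nat, 97 ≤ k → k ≤ 122 → ¬(k = c.toNat) := by omega
      simp [char_eq_iff_toNat, char_le_toNat, hne, hc]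
  · simp only [← String.toList_inj, h]
    simp

-- ===== VERDICT (by name: the statement is the Claim_ definition above) =====
theorem elevation_spec : Claim_equal_elevation := by
  intro ch _
  unfold Spec_elevation
  exact elevation_eq_alt ch
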